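-- pv_equiv track=rewrite | github.com/jmh0036/Codility | Lessons/Leaders/Equileaders.py | solution
-- ===== SOURCE A (Python) =====
-- def leader(A):
--     B = A.copy()
--     LenB = len(B)
--     DesiredLength = LenB//2
--     if LenB == 1:
--         return B[0]
--     B.sort()
--     count = 1
--     for idx in range(LenB-1):
--         if B[idx] == B[idx+1]:
--             count += 1
--             if count > DesiredLength:
--                 return B[idx]
--         else:
--             count = 1
--     return 0.5
--
-- def solution(A):
--     LenA = len(A)
--     if len(set(A)) == 1:
--         return LenA -1
--     Dominator = leader(A)
--     if Dominator == 0.5: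
--         return 0
--     FirstSlice = [A[0]]
--     SecondSlice = A[1:]
--     if FirstSlice[0] == Dominator:
--         FirstDomCount = 1
--     else:
--         FirstDomCount = 0
--     SecondDomCount = SecondSlice.count(Dominator)
--     LenFirst = 1
--     LenSecond = LenA-1
--     equileaders = 0
--     for i in range(LenA-1):
--         if FirstDomCount > LenFirst//2 and SecondDomCount > LenSecond//2:
--             equileaders += 1
--         FirstSlice.append(SecondSlice.pop(0))
--         LenFirst += 1
--         LenSecond -= 1
--         if FirstSlice[-1] == Dominator:
--             FirstDomCount += 1
--             SecondDomCount -= 1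
--     return equileaders
-- ===== SOURCE B (Python) =====
-- def solution(A):
--     n = len(A)
--     # Boyer-Moore majority vote: one pass to find the only possible dominator
--     cand, cnt = None, 0
--     for x in A:
--         if cnt == 0:
--             cand, cnt = x, 1
--         elif x == cand:
--             cnt += 1
--         else:
--             cnt -= 1
--     if cand is None:
--         return 0
--     total = A.count(cand)
--     if 2 * total <= n:
--         return 0
--     # one linear pass over prefix dominator counts
--     res, pref = 0, 0
--     for i, x in enumerate(A[:n - 1]):
--         if x == cand:
--             pref += 1
--         if 2 * pref > i + 1 and 2 * (total - pref) > n - i - 1: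
--             res += 1
--     return res
-- ===== Notes on version B (the rewrite author's own statement) =====
-- stated objective: faster
-- what changed: Replaces the sort-based leader search plus the loop that repeatedly pops the front of a list by a Boyer-Moore majority vote with one verification count and a single indexed pass over prefix dominator counts.
import Mathlib
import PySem

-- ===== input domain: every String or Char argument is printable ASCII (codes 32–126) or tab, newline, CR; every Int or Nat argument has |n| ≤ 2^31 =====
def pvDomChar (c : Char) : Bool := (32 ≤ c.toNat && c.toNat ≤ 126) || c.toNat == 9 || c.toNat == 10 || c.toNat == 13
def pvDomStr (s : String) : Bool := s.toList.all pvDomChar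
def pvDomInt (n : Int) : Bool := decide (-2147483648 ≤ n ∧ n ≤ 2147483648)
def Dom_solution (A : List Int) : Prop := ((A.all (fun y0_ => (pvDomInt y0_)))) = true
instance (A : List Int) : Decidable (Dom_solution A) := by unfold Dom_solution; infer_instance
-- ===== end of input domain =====

-- B replaces A's sort-based leader search and pop-from-front split loop by a Boyer-Moore
-- majority vote plus one linear pass over prefix dominator counts (faster).


-- ===== PORT A =====
-- leader's 'return 0.5' sentinel is a float that can never equal an element (Int);
-- it is ported as 'none', the int returns as 'some _'.
def leaderScan : List Int → Int → Int → Option Int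
  | x :: y :: rest, count, dl =>
      if x = y then
        if count + 1 > dl then some x
        else leaderScan (y :: rest) (count + 1) dl
      else leaderScan (y :: rest) 1 dl
  | _, _, _ => none

def leader (A : List Int) : Option Int :=
  let B := A
  let LenB : Int := (B.length : Int)
  let DesiredLength : Int := PySem.Int.floordiv LenB 2
  if LenB = 1 then some B.headI
  else leaderScan (PySem.List.sorted B (fun x => x) false) 1 DesiredLength

-- the 'for i in range(LenA-1)' loop; SecondSlice has exactly LenA-1 elements and one is
-- popped from its front per iteration, so the loop is structural recursion on SecondSlice
def solLoop (Dominator : Int) : List Int → Int → Int → Int → Int → Int → Int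
  | [], _, _, _, _, equileaders => equileaders
  | x :: rest, FirstDomCount, SecondDomCount, LenFirst, LenSecond, equileaders =>
      let eq' := if FirstDomCount > PySem.Int.floordiv LenFirst 2 ∧
                    SecondDomCount > PySem.Int.floordiv LenSecond 2
                 then equileaders + 1 else equileaders
      if x = Dominator then
        solLoop Dominator rest (FirstDomCount + 1) (SecondDomCount - 1) (LenFirst + 1) (LenSecond - 1) eq'
      else
        solLoop Dominator rest FirstDomCount SecondDomCount (LenFirst + 1) (LenSecond - 1) eq'

def solution (A : List Int) : Int :=
  let LenA : Int := (A.length : Int)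
  if (PySem.Set.ofList A).length = 1 then LenA - 1
  else
    match leader A with
    | none => 0   -- 'Dominator == 0.5'
    | some Dominator =>
      -- A[0]: A is nonempty here (an empty A has set-size 0 ≠ 1 and leader [] = none)
      let FirstDomCount : Int := if A.headI = Dominator then 1 else 0
      let SecondSlice := PySem.List.slice A (some 1) none
      let SecondDomCount : Int := (SecondSlice.count Dominator : Int)
      solLoop Dominator SecondSlice FirstDomCount SecondDomCount 1 (LenA - 1) 0

-- ===== PORT B =====
def bmStep (s : Option Int × Int) (x : Int) : Option Int × Int :=
  if s.2 = 0 then (some x, 1)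
  else if some x = s.1 then (s.1, s.2 + 1)
  else (s.1, s.2 - 1)

def eqlStep (c total n : Int) (s : Int × Int) (p : Int × Int) : Int × Int :=
  let pref := if p.2 = c then s.2 + 1 else s.2
  let res := if 2 * pref > p.1 + 1 ∧ 2 * (total - pref) > n - p.1 - 1 then s.1 + 1 else s.1
  (res, pref)

def solution_alt (A : List Int) : Int :=
  let n : Int := (A.length : Int)
  let bm := A.foldl bmStep (none, 0)
  match bm.1 with
  | none => 0
  | some c =>
    let total : Int := (A.count c : Int)
    if 2 * total ≤ n then 0
    else ((PySem.List.enumerate (PySem.List.slice A none (some (n - 1)))).foldl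
            (eqlStep c total n) (0, 0)).1

-- ===== PRECONDITION & SPEC =====
def Spec_solution (A : List Int) (out : Int) : Prop := out = solution_alt A
instance (A : List Int) (out : Int) : Decidable (Spec_solution A out) := by unfold Spec_solution; infer_instance

-- ===== CLAIM (what is proved, stated in full; the proofs are below) =====
def Claim_equal_solution : Prop := ∀ (A : List Int), Dom_solution A → Spec_solution A (solution A)

-- ===== LEMMAS AND PROOFS =====

def goodIdx (d : Int) (A : List Int) (i : Nat) : Bool :=
  decide (2 * ((A.take (i+1)).count d : Int) > (i : Int) + 1 ∧
          2 * ((A.count d : Int) - ((A.take (i+1)).count d : Int)) > (A.length : Int) - (i : Int) - 1)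



-- two distinct values cannot jointly exceed the length
lemma count_add_count_le (l : List Int) (z m : Int) (h : z ≠ m) :
    l.count z + l.count m ≤ l.length := by
  induction l with
  | nil => simp
  | cons a tl ih =>
      simp only [List.count_cons, List.length_cons, beq_iff_eq]
      split_ifs <;> omega

lemma solLoop_spec (d : Int) : ∀ (t p : List Int) (eq : Int), p ≠ [] →
    solLoop d t ((p.count d : Int)) ((t.count d : Int)) (p.length : Int) (t.length : Int) eq
      = eq + (((List.range t.length).countP (fun j => goodIdx d (p ++ t) (p.length - 1 + j))) : Int) := by
  intro t
  induction t with
  | nil => intro p eq hp; simp [solLoop]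
  | cons x rest ih =>
      intro p eq hp
      have hplen : 0 < p.length := List.length_pos_iff.mpr hp
      have hstep : ∀ (fdc sdc lf ls eq : Int), solLoop d (x :: rest) fdc sdc lf ls eq
          = solLoop d rest (if x = d then fdc + 1 else fdc) (if x = d then sdc - 1 else sdc)
              (lf + 1) (ls - 1)
              (if fdc > PySem.Int.floordiv lf 2 ∧ sdc > PySem.Int.floordiv ls 2 then eq + 1 else eq) := by
        intro fdc sdc lf ls eq
        simp only [solLoop]
        split_ifs <;> rfl
      rw [hstep]
      -- rewrite the new state as counts over p ++ [x] and rest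
      have hc1 : (if x = d then ((p.count d : Int)) + 1 else ((p.count d : Int)))
          = (((p ++ [x]).count d : Int)) := by
        rw [List.count_append]
        by_cases hx : x = d <;> simp [hx] <;> push_cast <;> ring
      have hc2 : (if x = d then (((x :: rest).count d : Int)) - 1 else (((x :: rest).count d : Int)))
          = ((rest.count d : Int)) := by
        rw [List.count_cons]
        by_cases hx : x = d <;> simp [hx] <;> push_cast <;> ring
      have hl1 : ((p.length : Int)) + 1 = (((p ++ [x]).length : Int)) := by
        simp
      have hl2 : (((x :: rest).length : Int)) - 1 = ((rest.length : Int)) := by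
        push_cast [List.length_cons]; ring
      rw [hc1, hc2, hl1, hl2, ih (p ++ [x]) _ (by simp)]
      -- now identify the counted predicates
      rw [List.length_cons, List.range_succ_eq_map, List.countP_cons, List.countP_map]
      have happ : (p ++ [x]) ++ rest = p ++ x :: rest := by simp
      have hpred : ((List.range rest.length).countP
            ((fun j => goodIdx d (p ++ x :: rest) (p.length - 1 + j)) ∘ Nat.succ))
          = ((List.range rest.length).countP
            (fun j => goodIdx d ((p ++ [x]) ++ rest) ((p ++ [x]).length - 1 + j))) := by
        apply List.countP_congr
        intro j hj
        have : p.length - 1 + Nat.succ j = (p ++ [x]).length - 1 + j := by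
          simp [List.length_append]; omega
        simp [Function.comp_apply, this, happ]
      rw [hpred]
      -- the head condition is goodIdx at index p.length - 1
      have hgood : goodIdx d (p ++ x :: rest) (p.length - 1 + 0)
          = decide (((p.count d : Int)) > PySem.Int.floordiv ((p.length : Int)) 2 ∧
              (((x :: rest).count d : Int)) > PySem.Int.floordiv (((x :: rest).length : Int)) 2) := by
        unfold goodIdx
        have htake : (p ++ x :: rest).take (p.length - 1 + 0 + 1) = p := by
          have : p.length - 1 + 0 + 1 = p.length := by omega
          rw [this, List.take_left]
        rw [htake]
        refine decide_eq_decide.mpr ?_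
        rw [List.count_append, List.length_append,
            PySem.Int.floordiv_eq_ediv_of_pos (by norm_num : (0:Int) < 2),
            PySem.Int.floordiv_eq_ediv_of_pos (by norm_num : (0:Int) < 2)]
        push_cast
        constructor <;> intro h <;> constructor <;> omega
      rw [hgood]
      simp only [decide_eq_true_iff, List.length_cons]
      split_ifs <;> push_cast <;> omega

lemma eqlFold_spec (c total n : Int) : ∀ (l : List Int) (s pref res : Int),
    ((PySem.List.enumerate l s).foldl (eqlStep c total n) (res, pref)).1
      = res + (((List.range l.length).countP (fun j =>
          decide (2 * (pref + ((l.take (j+1)).count c : Int)) > s + j + 1 ∧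
                  2 * (total - (pref + ((l.take (j+1)).count c : Int))) > n - s - j - 1))) : Int) := by
  intro l
  induction l with
  | nil => intro s pref res; simp [PySem.List.enumerate]
  | cons x rest ih =>
      intro s pref res
      rw [PySem.List.enumerate_cons, List.foldl_cons]
      have hstep : eqlStep c total n (res, pref) (s, x) =
          ((if 2 * (if x = c then pref + 1 else pref) > s + 1 ∧
               2 * (total - (if x = c then pref + 1 else pref)) > n - s - 1
            then res + 1 else res), (if x = c then pref + 1 else pref)) := by
        simp [eqlStep]
      rw [hstep, ih]
      rw [List.length_cons, List.range_succ_eq_map, List.countP_cons, List.countP_map]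
      have hcnt : ∀ (j : Nat), (((x :: rest).take (j+1+1)).count c : Int)
          = (if x = c then 1 else 0) + ((rest.take (j+1)).count c : Int) := by
        intro j
        simp only [List.take_succ_cons, List.count_cons, beq_iff_eq]
        by_cases hx : x = c <;> simp [hx] <;> push_cast <;> ring
      have hpred : ((List.range rest.length).countP
            ((fun j => decide (2 * (pref + (((x :: rest).take (j+1)).count c : Int)) > s + j + 1 ∧
                  2 * (total - (pref + (((x :: rest).take (j+1)).count c : Int))) > n - s - j - 1)) ∘ Nat.succ))
          = ((List.range rest.length).countP (fun j =>
          decide (2 * ((if x = c then pref + 1 else pref) + ((rest.take (j+1)).count c : Int)) > (s+1) + j + 1 ∧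
                  2 * (total - ((if x = c then pref + 1 else pref) + ((rest.take (j+1)).count c : Int))) > n - (s+1) - j - 1))) := by
        apply List.countP_congr
        intro j hj
        simp only [Function.comp_apply, Nat.succ_eq_add_one, hcnt j]
        simp only [decide_eq_true_iff]
        push_cast
        constructor <;> intro h <;> split_ifs at h ⊢ <;> omega
      rw [hpred]
      have hfirst : (((x :: rest).take (0+1)).count c : Int) = (if x = c then 1 else 0) := by
        by_cases hx : x = c <;> simp [hx]
      rw [hfirst]
      simp only [decide_eq_true_iff, Nat.cast_zero]
      push_cast
      split_ifs <;> omega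

lemma not_mem_tail_of_sorted {x y : Int} {rest : List Int}
    (hs : (x :: y :: rest).Pairwise (· ≤ ·)) (hxy : x ≠ y) : x ∉ y :: rest := by
  intro hmem
  rcases List.mem_cons.mp hmem with h | h
  · exact hxy h
  · have hxy' : x ≤ y := (List.pairwise_cons.mp hs).1 y (by simp)
    have hyx : y ≤ x := (List.pairwise_cons.mp (List.pairwise_cons.mp hs).2).1 x h
    exact hxy (le_antisymm hxy' hyx)

lemma scan_some_sound : ∀ (l : List Int) (c dl z : Int), l.Pairwise (· ≤ ·) →
    leaderScan l c dl = some z →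
    z ∈ l ∧ (l.count z : Int) + (if l.head? = some z then c - 1 else 0) > dl := by
  intro l c dl
  induction l, c, dl using leaderScan.induct with
  | case1 y rest c dl hgt =>
      intro z hs hscan
      rw [leaderScan, if_pos rfl, if_pos hgt] at hscan
      obtain rfl : y = z := Option.some_injective _ hscan
      refine ⟨by simp, ?_⟩
      simp only [List.head?_cons, Option.some.injEq, if_pos rfl]
      have : (2 : Nat) ≤ (y :: y :: rest).count y := by
        simp [List.count_cons]
      push_cast at this ⊢
      omega
  | case2 y rest c dl hle ih =>
      intro z hs hscan
      rw [leaderScan, if_pos rfl, if_neg hle] at hscan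
      obtain ⟨hmem, hcnt⟩ := ih z (List.pairwise_cons.mp hs).2 hscan
      refine ⟨by simp [hmem], ?_⟩
      by_cases hz : y = z
      · subst hz
        simp only [List.head?_cons, Option.some.injEq, if_pos rfl] at hcnt ⊢
        have : (y :: y :: rest).count y = (y :: rest).count y + 1 := by
          simp [List.count_cons]
        rw [this]
        push_cast
        push_cast at hcnt
        omega
      · simp only [List.head?_cons, Option.some.injEq, if_neg hz] at hcnt ⊢
        have : (y :: y :: rest).count z = (y :: rest).count z := by
          simp [List.count_cons, hz, fun h : z = y => hz h.symm]
        rw [this]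
        simpa using hcnt
  | case3 x y rest c dl hxy ih =>
      intro z hs hscan
      rw [leaderScan, if_neg hxy] at hscan
      obtain ⟨hmem, hcnt⟩ := ih z (List.pairwise_cons.mp hs).2 hscan
      have hzx : z ≠ x := by
        intro h; subst h
        exact not_mem_tail_of_sorted hs hxy hmem
      refine ⟨by simp [hmem], ?_⟩
      simp only [List.head?_cons, Option.some.injEq, if_neg (Ne.symm hzx)]
      have : (x :: y :: rest).count z = (y :: rest).count z := by
        simp [List.count_cons, hzx, Ne.symm hzx]
      rw [this]
      split_ifs at hcnt with h
      · push_cast at hcnt ⊢; omega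
      · simpa using hcnt
  | case4 t a b h1 =>
      intro z hs hscan
      exfalso
      cases t with
      | nil => simp [leaderScan] at hscan
      | cons u v =>
          cases v with
          | nil => simp [leaderScan] at hscan
          | cons w u2 => exact h1 u w u2 rfl

lemma scan_none_complete : ∀ (l : List Int) (c dl : Int), l.Pairwise (· ≤ ·) →
    1 ≤ c → c ≤ dl → leaderScan l c dl = none →
    ∀ z, (l.count z : Int) + (if l.head? = some z then c - 1 else 0) ≤ dl := by
  intro l c dl
  induction l, c, dl using leaderScan.induct with
  | case1 y rest c dl hgt =>
      intro hs hc hcdl hscan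
      rw [leaderScan, if_pos rfl, if_pos hgt] at hscan
      exact absurd hscan (by simp)
  | case2 y rest c dl hle ih =>
      intro hs hc hcdl hscan z
      rw [leaderScan, if_pos rfl, if_neg hle] at hscan
      have ih' := ih (List.pairwise_cons.mp hs).2 (by omega) (by omega) hscan z
      by_cases hz : y = z
      · subst hz
        simp only [List.head?_cons, Option.some.injEq, if_pos rfl] at ih' ⊢
        have : (y :: y :: rest).count y = (y :: rest).count y + 1 := by
          simp [List.count_cons]
        rw [this]
        push_cast at ih' ⊢
        omega
      · simp only [List.head?_cons, Option.some.injEq, if_neg hz] at ih' ⊢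
        have : (y :: y :: rest).count z = (y :: rest).count z := by
          simp [List.count_cons, hz, fun h : z = y => hz h.symm]
        rw [this]
        exact ih'
  | case3 x y rest c dl hxy ih =>
      intro hs hc hcdl hscan z
      rw [leaderScan, if_neg hxy] at hscan
      have ih' := ih (List.pairwise_cons.mp hs).2 le_rfl (by omega) hscan z
      by_cases hz : x = z
      · subst hz
        have hnot : x ∉ y :: rest := not_mem_tail_of_sorted hs hxy
        have h0 : (y :: rest).count x = 0 := List.count_eq_zero.mpr hnot
        have : (x :: y :: rest).count x = 1 := by
          simp [List.count_cons, h0]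
        rw [this]
        simp only [List.head?_cons, Option.some.injEq, if_pos rfl]
        push_cast
        omega
      · simp only [List.head?_cons, Option.some.injEq, if_neg hz] at ih' ⊢
        have : (x :: y :: rest).count z = (y :: rest).count z := by
          simp [List.count_cons, hz, fun h : z = x => hz h.symm]
        rw [this]
        split_ifs at ih' with h
        · push_cast at ih' ⊢; omega
        · simpa using ih'
  | case4 t a b h1 =>
      intro hs hc hcdl hscan z
      cases t with
      | nil => simp; omega
      | cons u v =>
          cases v with
          | nil =>
              by_cases hz : u = z
              · subst hz
                simp [List.count_cons]
                omega
              · simp [List.count_cons, fun h : z = u => hz h.symm, hz]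
                omega
          | cons w u2 => exact absurd rfl (h1 u w u2)

lemma bm_inv : ∀ (l : List Int) (cand : Option Int) (cnt m : Int) (f : Int → Int),
    0 ≤ cnt →
    (∀ z, 2 * f z + cnt ≤ m + (if cand = some z then 2 * cnt else 0)) →
    0 ≤ (l.foldl bmStep (cand, cnt)).2 ∧
    ∀ z, 2 * (f z + (l.count z : Int)) + (l.foldl bmStep (cand, cnt)).2
         ≤ m + (l.length : Int) + (if (l.foldl bmStep (cand, cnt)).1 = some z then 2 * (l.foldl bmStep (cand, cnt)).2 else 0) := by
  intro l
  induction l with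
  | nil =>
      intro cand cnt m f h0 hinv
      refine ⟨h0, ?_⟩
      intro z
      simpa using hinv z
  | cons x t ih =>
      intro cand cnt m f h0 hinv
      rw [List.foldl_cons]
      have hcount : ∀ w : Int, ((x :: t).count w : Int) = (if w = x then 1 else 0) + (t.count w : Int) := by
        intro w
        simp only [List.count_cons, beq_iff_eq]
        push_cast
        split_ifs <;> omega
      set f' : Int → Int := fun w => f w + (if w = x then 1 else 0) with hf'
      have key : ∀ (cand' : Option Int) (cnt' : Int), bmStep (cand, cnt) x = (cand', cnt') →
          0 ≤ cnt' ∧ ∀ z, 2 * f' z + cnt' ≤ (m + 1) + (if cand' = some z then 2 * cnt' else 0) := by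
        intro cand' cnt' hstep
        simp only [bmStep] at hstep
        split_ifs at hstep with hz hx
        · -- cnt = 0, new state (some x, 1)
          injection hstep with hh1 hh2
          subst hh1; subst hh2
          refine ⟨by norm_num, ?_⟩
          intro z
          have h := hinv z
          simp only [hf', Option.some.injEq]
          split_ifs at h ⊢ <;> omega
        · -- some x = cand, cnt+1
          injection hstep with hh1 hh2
          subst hh1; subst hh2
          refine ⟨by omega, ?_⟩
          intro z
          have h := hinv z
          rw [← hx] at h ⊢
          simp only [hf', Option.some.injEq] at h ⊢
          split_ifs at h ⊢ <;> omega
        · -- else, cnt-1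
          injection hstep with hh1 hh2
          subst hh1; subst hh2
          refine ⟨by omega, ?_⟩
          intro z
          have h := hinv z
          by_cases hcz : cand = some z
          · have hzx : z ≠ x := by
              intro hh; apply hx; rw [hcz, hh]
            rw [if_pos hcz] at h ⊢
            simp only [hf', if_neg hzx]
            omega
          · rw [if_neg hcz] at h ⊢
            simp only [hf']
            split_ifs <;> omega
      obtain ⟨h1, h2⟩ := key (bmStep (cand, cnt) x).1 (bmStep (cand, cnt) x).2 rfl
      obtain ⟨hA, hB⟩ := ih (bmStep (cand, cnt) x).1 (bmStep (cand, cnt) x).2 (m + 1) f' h1 h2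
      refine ⟨hA, ?_⟩
      intro z
      have hz := hB z
      rw [hcount z]
      simp only [hf'] at hz
      simp only [Prod.mk.eta] at hz
      simp only [List.length_cons]
      push_cast at hz ⊢
      split_ifs at hz ⊢ <;> omega

lemma bm_some : ∀ (l : List Int) (c : Int) (k : Int), ∃ c', (l.foldl bmStep (some c, k)).1 = some c' := by
  intro l
  induction l with
  | nil => intro c k; exact ⟨c, rfl⟩
  | cons x t ih =>
      intro c k
      rw [List.foldl_cons]
      simp only [bmStep]
      split_ifs <;> first
        | exact ih x 1
        | exact ih c (k+1)
        | exact ih c (k-1)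


lemma bm_majority (A : List Int) (mjr : Int) (hm : 2 * ((A.count mjr : Int)) > (A.length : Int)) :
    (A.foldl bmStep (none, 0)).1 = some mjr := by
  obtain ⟨h0, hB⟩ := bm_inv A none 0 0 (fun _ => 0) le_rfl (fun z => by simp)
  have h := hB mjr
  by_contra hne
  rw [if_neg hne] at h
  simp only [zero_add, add_zero] at h
  omega

lemma leader_eq_some_of_majority (A : List Int) (hn : 2 ≤ A.length) (mjr : Int)
    (hm : 2 * ((A.count mjr : Int)) > (A.length : Int)) : leader A = some mjr := by
  have h2n : (2:Int) ≤ (A.length : Int) := by exact_mod_cast hn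
  have hne1 : ((A.length : Int)) ≠ 1 := by omega
  simp only [leader]
  rw [if_neg hne1]
  have hpw : (PySem.List.sorted A (fun x => x) false).Pairwise (· ≤ ·) :=
    PySem.List.sorted_pairwise A _
  have hperm : (PySem.List.sorted A (fun x => x) false).Perm A := PySem.List.sorted_perm A _ _
  have hdl : PySem.Int.floordiv ((A.length : Int)) 2 = (A.length : Int) / 2 :=
    PySem.Int.floordiv_eq_ediv_of_pos (by norm_num)
  cases hscan : leaderScan (PySem.List.sorted A (fun x => x) false) 1 (PySem.Int.floordiv ((A.length : Int)) 2) with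
  | none =>
      exfalso
      have h := scan_none_complete _ 1 _ hpw le_rfl (by rw [hdl]; omega) hscan mjr
      rw [hperm.count_eq] at h
      split_ifs at h <;> rw [hdl] at h <;> omega
  | some z =>
      obtain ⟨hmem, hcnt⟩ := scan_some_sound _ 1 _ z hpw hscan
      rw [hperm.count_eq] at hcnt
      have h2 : 2 * ((A.count z : Int)) > (A.length : Int) := by
        split_ifs at hcnt <;> rw [hdl] at hcnt <;> omega
      have hz : z = mjr := by
        by_contra hzm
        have hcc := count_add_count_le A z mjr hzm
        have : ((A.count z : Int)) + ((A.count mjr : Int)) ≤ (A.length : Int) := by exact_mod_cast hcc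
        omega
      rw [hz]

lemma leader_eq_none_of_no_majority (A : List Int) (hn : 2 ≤ A.length)
    (hm : ∀ z, 2 * ((A.count z : Int)) ≤ (A.length : Int)) : leader A = none := by
  have h2n : (2:Int) ≤ (A.length : Int) := by exact_mod_cast hn
  have hne1 : ((A.length : Int)) ≠ 1 := by omega
  simp only [leader]
  rw [if_neg hne1]
  have hpw : (PySem.List.sorted A (fun x => x) false).Pairwise (· ≤ ·) :=
    PySem.List.sorted_pairwise A _
  have hperm : (PySem.List.sorted A (fun x => x) false).Perm A := PySem.List.sorted_perm A _ _
  have hdl : PySem.Int.floordiv ((A.length : Int)) 2 = (A.length : Int) / 2 :=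
    PySem.Int.floordiv_eq_ediv_of_pos (by norm_num)
  cases hscan : leaderScan (PySem.List.sorted A (fun x => x) false) 1 (PySem.Int.floordiv ((A.length : Int)) 2) with
  | none => rfl
  | some z =>
      exfalso
      obtain ⟨hmem, hcnt⟩ := scan_some_sound _ 1 _ z hpw hscan
      rw [hperm.count_eq] at hcnt
      have := hm z
      split_ifs at hcnt <;> rw [hdl] at hcnt <;> omega

lemma set_singleton_len (a : Int) : (PySem.Set.ofList [a]).length = 1 := by
  simp [PySem.Set.ofList, PySem.Set.add, PySem.Set.contains]

lemma all_eq_of_set_len_one (A : List Int) (h : (PySem.Set.ofList A).length = 1) :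
    ∀ x ∈ A, ∀ y ∈ A, x = y := by
  obtain ⟨c, hc⟩ := List.length_eq_one_iff.mp h
  intro x hx y hy
  have hx' : x ∈ PySem.Set.ofList A := (PySem.Set.mem_ofList A x).mpr hx
  have hy' : y ∈ PySem.Set.ofList A := (PySem.Set.mem_ofList A y).mpr hy
  rw [hc] at hx' hy'
  simp at hx' hy'
  rw [hx', hy']

lemma a_loop_eq (a : Int) (t : List Int) (c : Int) :
    solLoop c t (if a = c then 1 else 0) ((t.count c : Int)) 1 ((((a :: t).length : Int)) - 1) 0
      = (((List.range t.length).countP (fun j => goodIdx c (a :: t) j)) : Int) := by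
  have h1 : (if a = c then (1:Int) else 0) = (([a].count c : Int)) := by
    by_cases h : a = c
    · subst h; simp
    · simp [List.count_cons, h, fun hh : c = a => h hh.symm]
  have h2 : ((((a :: t).length : Int)) - 1) = ((t.length : Int)) := by
    push_cast [List.length_cons]; ring
  have h3 : (1:Int) = (([a].length : Int)) := by simp
  rw [h1, h2, h3, solLoop_spec c t [a] 0 (by simp)]
  rw [zero_add]
  congr 1
  apply List.countP_congr
  intro j hj
  have : [a].length - 1 + j = j := by simp
  rw [this, List.singleton_append]

lemma b_loop_eq (L : List Int) (c : Int) (hn : 1 ≤ L.length) :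
    ((PySem.List.enumerate (PySem.List.slice L none (some ((L.length : Int) - 1)))).foldl
        (eqlStep c ((L.count c : Int)) ((L.length : Int))) ((0:Int), (0:Int))).1
      = (((List.range (L.length - 1)).countP (fun j => goodIdx c L j)) : Int) := by
  have hsl : PySem.List.slice L none (some ((L.length : Int) - 1)) = L.take (L.length - 1) := by
    rw [show ((L.length : Int) - 1) = (((L.length - 1 : Nat)) : Int) by omega]
    simp [pysem]
  rw [hsl, eqlFold_spec, zero_add]
  have hlen : (L.take (L.length - 1)).length = L.length - 1 := by
    simp [List.length_take]
  rw [hlen]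
  congr 1
  apply List.countP_congr
  intro j hj
  have hj' : j < L.length - 1 := List.mem_range.mp hj
  have htt : (L.take (L.length - 1)).take (j+1) = L.take (j+1) := by
    rw [List.take_take, min_eq_left (by omega)]
  rw [htt]
  unfold goodIdx
  simp only [decide_eq_true_iff]
  constructor <;> intro h <;> constructor <;> push_cast at h ⊢ <;> omega

-- ===== VERDICT (by name: the statement is the Claim_ definition above) =====
theorem solution_spec : Claim_equal_solution := by
  unfold Claim_equal_solution
  intro A _
  unfold Spec_solution
  cases A with
  | nil => decide
  | cons a t =>
    by_cases hset : (PySem.Set.ofList (a :: t)).length = 1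
    · -- all elements of a :: t are equal
      have hall : ∀ x ∈ (a :: t), ∀ y ∈ (a :: t), x = y := all_eq_of_set_len_one _ hset
      have hc : (a :: t).count a = (a :: t).length :=
        List.count_eq_length.mpr (fun b hb => hall a (by simp) b hb)
      have hn1 : 1 ≤ (a :: t).length := by simp
      have hA : solution (a :: t) = (((a :: t).length : Int)) - 1 := by
        simp only [solution]
        rw [if_pos hset]
      have hmaj : 2 * (((a :: t).count a : Int)) > (((a :: t).length : Int)) := by
        rw [hc]; push_cast [List.length_cons]; omega
      have hbm := bm_majority (a :: t) a hmaj
      have hB : solution_alt (a :: t)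
          = (((List.range ((a :: t).length - 1)).countP (fun j => goodIdx a (a :: t) j)) : Int) := by
        simp only [solution_alt]
        split
        · rename_i heq
          rw [heq] at hbm
          exact absurd hbm (by simp)
        · rename_i c heq
          rw [heq] at hbm
          injection hbm with hh
          rw [hh]
          rw [if_neg (by omega)]
          exact b_loop_eq (a :: t) a hn1
      rw [hA, hB]
      have hcount : (List.range ((a :: t).length - 1)).countP (fun j => goodIdx a (a :: t) j)
          = (a :: t).length - 1 := by
        rw [List.countP_eq_length.mpr, List.length_range]
        intro j hj
        have hj' : j < (a :: t).length - 1 := List.mem_range.mp hj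
        have htl : ((a :: t).take (j+1)).length = j+1 := by
          rw [List.length_cons] at hj'
          simp only [List.length_take, List.length_cons]
          omega
        have hct : ((a :: t).take (j+1)).count a = j+1 := by
          rw [List.count_eq_length.mpr, htl]
          intro b hb
          exact hall a (by simp) b (List.take_subset _ _ hb)
        unfold goodIdx
        rw [decide_eq_true_iff]
        rw [hct, hc]
        constructor <;> push_cast <;> omega
      rw [hcount]
      omega
    · -- at least two distinct values, so length ≥ 2
      have hn2 : 2 ≤ (a :: t).length := by
        cases t with
        | nil => exact absurd (set_singleton_len a) hset
        | cons b t2 => simp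
      by_cases hmaj : ∃ m2, 2 * (((a :: t).count m2 : Int)) > (((a :: t).length : Int))
      · obtain ⟨mjr, hm⟩ := hmaj
        have hld := leader_eq_some_of_majority (a :: t) hn2 mjr hm
        have hbm := bm_majority (a :: t) mjr hm
        have hA : solution (a :: t)
            = (((List.range t.length).countP (fun j => goodIdx mjr (a :: t) j)) : Int) := by
          simp only [solution]
          rw [if_neg hset]
          split
          · rename_i heq
            rw [heq] at hld
            exact absurd hld (by simp)
          · rename_i c heq
            rw [heq] at hld
            injection hld with hh
            rw [hh]
            rw [show PySem.List.slice (a :: t) (some 1) none = t by simp [pysem]]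
            simp only [List.headI]
            exact a_loop_eq a t mjr
        have hB : solution_alt (a :: t)
            = (((List.range ((a :: t).length - 1)).countP (fun j => goodIdx mjr (a :: t) j)) : Int) := by
          simp only [solution_alt]
          split
          · rename_i heq
            rw [heq] at hbm
            exact absurd hbm (by simp)
          · rename_i c heq
            rw [heq] at hbm
            injection hbm with hh
            rw [hh]
            rw [if_neg (by omega)]
            exact b_loop_eq (a :: t) mjr (by omega)
        rw [hA, hB]
        have : (a :: t).length - 1 = t.length := by simp
        rw [this]
      · push_neg at hmaj
        have hld := leader_eq_none_of_no_majority (a :: t) hn2 hmaj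
        have hA : solution (a :: t) = 0 := by
          simp only [solution]
          rw [if_neg hset]
          split
          · rfl
          · rename_i c heq
            rw [heq] at hld
            exact absurd hld (by simp)
        have hB : solution_alt (a :: t) = 0 := by
          simp only [solution_alt]
          have hfold : (a :: t).foldl bmStep (none, 0) = t.foldl bmStep (some a, 1) := by
            rw [List.foldl_cons]
            norm_num [bmStep]
          obtain ⟨c', hc'⟩ := bm_some t a 1
          split
          · rfl
          · rename_i c heq
            rw [if_pos (hmaj c)]
        rw [hA, hB]
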